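-- pv_equiv track=rewrite | github.com/veiset/Brunobot | module/extra/typofixer.py | sentenceDist
-- ===== SOURCE A (Python) =====
-- def distance(s1, s2):
--     '''
--     distance() -> levenshtein distance between two strings
--
--     Keyword arguments:
--     s1 -- string one
--     s2 -- string two
--     '''
--
--     if len(s1) < len(s2):
--         return distance(s2, s1)
--     if not s1:
--         return len(s2)
--
--     row = range(len(s2) + 1)
--     for i, c1 in enumerate(s1):
--         current = [i + 1]
--
--         for j, c2 in enumerate(s2):
--             # find the min cost of deletion, insertion and substitution
--             current.append(min(row[j+1]+1, current[j]+1, row[j]+(c1 != c2)))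
--
--         row = current
--
--     return row[-1]
--
-- def sentenceDist(sentence, typo):
--     '''
--     sentenceDist() -> the best match against all the sentence combinations
--
--
--     Keyword arguments:
--     s1  --  Sentence to match against
--     s2  --  Flagged typo
--     '''
--
--     words = sentence.split(' ')
--     results = []
--
--     for start in range(len(words)):
--
--         for end in range(start,len(words)+1):
--             suggestedFix = " ".join(words[start:end])
--             dist = distance(typo, suggestedFix)
--
--             # assuming spaces aren't a part of the edit distance
--             dist = dist - (end-start)
--             if not distance == 0:
--                 results.append([dist, suggestedFix])
--
--     results.sort()
--
--     if results:
--         return sentence.replace(results[0][1], typo, 1)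
--     else:
--         return None
-- ===== SOURCE B (Python) =====
-- def sentenceDist(sentence, typo):
--     '''Best edit-distance match over word-substrings, replacing it with the typo.
--
--     Alternative implementation: per start position the Levenshtein DP column
--     over the typo is extended character by character while the candidate
--     substring grows word by word, and a running minimum replaces the sort.
--     '''
--     words = sentence.split(' ')
--     t = typo
--     n = len(t)
--     best = None
--
--     for start in range(len(words)):
--         # column i holds distance(t[:i], fix) for the fix built so far
--         col = list(range(n + 1))
--         fix = ""
--         k = 0
--         cand = (col[-1] - k, fix)
--         if best is None or cand < best:
--             best = cand
--         for w in words[start:]: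
--             sep = "" if k == 0 else " "
--             for c in sep + w:
--                 prev = col
--                 col = [prev[0] + 1]
--                 for i, tc in enumerate(t):
--                     col.append(min(col[i] + 1, prev[i + 1] + 1, prev[i] + (tc != c)))
--             k += 1
--             fix = fix + sep + w
--             cand = (col[-1] - k, fix)
--             if cand < best:
--                 best = cand
--
--     return sentence.replace(best[1], typo, 1)
-- ===== Notes on version B (the rewrite author's own statement) =====
-- stated objective: alternative
-- what changed: Instead of recomputing a full Levenshtein DP for every (start,end) word-substring and then sorting all candidates, B extends one DP column over the typo character-by-character per start position and keeps a running first-minimum instead of a sort.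
import Mathlib
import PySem

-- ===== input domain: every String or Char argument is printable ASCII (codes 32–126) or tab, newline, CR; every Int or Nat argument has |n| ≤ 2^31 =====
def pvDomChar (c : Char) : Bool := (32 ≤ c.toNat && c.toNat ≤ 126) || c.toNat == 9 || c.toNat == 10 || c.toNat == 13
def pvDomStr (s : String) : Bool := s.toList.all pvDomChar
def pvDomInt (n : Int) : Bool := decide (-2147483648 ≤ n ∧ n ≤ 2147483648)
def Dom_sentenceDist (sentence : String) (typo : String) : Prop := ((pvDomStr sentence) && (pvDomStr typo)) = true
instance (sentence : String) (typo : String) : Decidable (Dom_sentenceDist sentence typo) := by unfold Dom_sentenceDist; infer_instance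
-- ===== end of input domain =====

-- B replaces A's full Levenshtein recomputation per word-substring (plus a global sort)
-- by one DP column per start position, extended character by character, with a running
-- first-minimum; objective: alternative (a different algorithm of similar measured cost).

-- ===== PORT A =====

-- inner loop of distance(): j runs over s2; prev is row[j:], cur is current[j]
def distRowA (c1 : Char) (cur : Nat) (prev : List Nat) (s2 : List Char) : List Nat :=
  match prev, s2 with
  | p :: q :: rest, c2 :: cs =>
      let v := min (q + 1) (min (cur + 1) (p + (if c1 ≠ c2 then 1 else 0)))
      v :: distRowA c1 v (q :: rest) cs
  | _, _ => []

-- outer loop of distance(): i, c1 run over s1 (enumerate)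
def distLoopA (s2 : List Char) : List Char → Nat → List Nat → List Nat
  | [], _, row => row
  | c1 :: cs, i, row => distLoopA s2 cs (i + 1) ((i + 1) :: distRowA c1 (i + 1) row s2)

-- body of distance() after the one argument swap (then len(s1) >= len(s2), so no further swap)
def distanceCoreA (s1 s2 : List Char) : Nat :=
  if s1 = [] then s2.length
  else (distLoopA s2 s1 0 (List.range (s2.length + 1))).getLast?.getD 0  -- row[-1]; row is never empty

def distanceA (s1 s2 : List Char) : Nat :=
  if s1.length < s2.length then distanceCoreA s2 s1 else distanceCoreA s1 s2

-- s.replace(old, new, 1): replace the first occurrence only (Chars.find = first match, -1 if absent)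
def pyReplaceOnce (s old new : List Char) : List Char :=
  let i := PySem.Chars.find s old
  if i = -1 then s else s.take i.toNat ++ new ++ s.drop (i.toNat + old.length)

def sentenceDist (sentence : String) (typo : String) : Option String :=
  let s := sentence.toList
  let t := typo.toList
  let words := PySem.Chars.splitOn s [' ']          -- sentence.split(' '), sep ≠ ''
  -- `if not distance == 0` in the Python compares the FUNCTION to 0, so it is always true
  let results : List (Int × List Char) :=
    (List.range words.length).foldl (fun acc (start : Nat) =>
      (List.range' start (words.length + 1 - start)).foldl (fun acc (e : Nat) =>
        let fix := PySem.Chars.join [' '] (PySem.List.slice words (some (start : Int)) (some (e : Int)))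
        let dist : Int := (distanceA t fix : Int) - ((e : Int) - (start : Int))
        acc ++ [(dist, fix)]) acc) []
  -- results.sort(): lists [int, str] compare lexicographically = the Lex order on the pair
  match PySem.List.sorted results (fun p => toLex p) false with
  | [] => none
  | (_, fix) :: _ => some (String.ofList (pyReplaceOnce s fix t))

-- ===== PORT B =====

-- innermost loop of Source B: i, tc run over t; prev is prev[i:], cur is col[i]
def colRowB (c : Char) (cur : Nat) (t : List Char) (prev : List Nat) : List Nat :=
  match t, prev with
  | tc :: ts, p :: q :: rest =>
      let v := min (cur + 1) (min (q + 1) (p + (if tc ≠ c then 1 else 0)))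
      v :: colRowB c v ts (q :: rest)
  | _, _ => []

-- one character appended to the candidate: new column from the previous one
def colStepB (t : List Char) (col : List Nat) (c : Char) : List Nat :=
  match col with
  | [] => []                                       -- unreachable: col always has length |t|+1
  | p :: rest => (p + 1) :: colRowB c (p + 1) t (p :: rest)

-- `if best is None or cand < best: best = cand`
def updMinB (best : Option (Int × List Char)) (cand : Int × List Char) : Option (Int × List Char) :=
  match best with
  | none => some cand
  | some b => if toLex cand < toLex b then some cand else some b

-- body of `for w in words[start:]`; state (col, fix, k, best)
def innerWordStep (t : List Char) (st : List Nat × List Char × Nat × Option (Int × List Char))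
    (w : List Char) : List Nat × List Char × Nat × Option (Int × List Char) :=
  let sep : List Char := if st.2.2.1 = 0 then [] else [' ']
  let col' := (sep ++ w).foldl (colStepB t) st.1
  let fix' := st.2.1 ++ sep ++ w
  (col', fix', st.2.2.1 + 1,
    updMinB st.2.2.2 (((col'.getLast?.getD 0 : Nat) : Int) - ((st.2.2.1 + 1 : Nat) : Int), fix'))

-- body of `for start in range(len(words))`
def startStep (t : List Char) (words : List (List Char))
    (best : Option (Int × List Char)) (start : Nat) : Option (Int × List Char) :=
  let col0 := List.range (t.length + 1)
  let best1 := updMinB best (((col0.getLast?.getD 0 : Nat) : Int) - (0 : Int), ([] : List Char))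
  ((PySem.List.slice words (some (start : Int)) none).foldl (innerWordStep t)
      (col0, ([] : List Char), 0, best1)).2.2.2

def sentenceDist_alt (sentence : String) (typo : String) : Option String :=
  let s := sentence.toList
  let t := typo.toList
  let words := PySem.Chars.splitOn s [' ']
  match (List.range words.length).foldl (startStep t words) none with
  | some (_, fix) => some (String.ofList (pyReplaceOnce s fix t))
  | none => none                                   -- unreachable: words is never empty

-- ===== PRECONDITION & SPEC =====
def Spec_sentenceDist (sentence : String) (typo : String) (out : Option String) : Prop := out = sentenceDist_alt sentence typo
instance (sentence : String) (typo : String) (out : Option String) : Decidable (Spec_sentenceDist sentence typo out) := by unfold Spec_sentenceDist; infer_instance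

-- ===== CLAIM (what is proved, stated in full; the proofs are below) =====
def Claim_equal_sentenceDist : Prop := ∀ (sentence : String) (typo : String), Dom_sentenceDist sentence typo → Spec_sentenceDist sentence typo (sentenceDist sentence typo)

-- ===== LEMMAS AND PROOFS =====

-- recursive Levenshtein distance, cost order matching the ports' min expressions
def lev : List Char → List Char → Nat
  | [], ys => ys.length
  | _ :: xs, [] => xs.length + 1
  | x :: xs, y :: ys =>
      min (lev xs (y :: ys) + 1) (min (lev (x :: xs) ys + 1) (lev xs ys + (if x = y then 0 else 1)))
termination_by a b => a.length + b.length

lemma lev_nil_left (ys : List Char) : lev [] ys = ys.length := by simp [lev]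

lemma lev_nil_right (xs : List Char) : lev xs [] = xs.length := by
  cases xs <;> simp [lev]

lemma lev_cons_cons (x y : Char) (xs ys : List Char) :
    lev (x :: xs) (y :: ys) =
      min (lev xs (y :: ys) + 1) (min (lev (x :: xs) ys + 1) (lev xs ys + (if x = y then 0 else 1))) := by
  simp [lev]

lemma lev_comm : ∀ (a b : List Char), lev a b = lev b a := by
  intro a
  induction a with
  | nil => intro b; cases b <;> simp [lev_nil_left, lev_nil_right]
  | cons x xs ih =>
    intro b
    induction b with
    | nil => simp [lev_nil_left, lev_nil_right]
    | cons y ys ihb =>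
      rw [lev_cons_cons, lev_cons_cons, ih (y :: ys), ihb, ih ys]
      have hc : (if x = y then 0 else 1) = (if y = x then 0 else 1) := by
        by_cases h : x = y <;> simp [h, Ne.symm]
      rw [hc]
      omega

def levd (a b : List Char) : Nat := lev a.reverse b.reverse

lemma edist_comm (a b : List Char) : levd a b = levd b a := by
  unfold levd; exact lev_comm _ _

-- rowSpec P Q tz: DP row entries lev P Q, lev P (tz₀::Q), lev P (tz₁::tz₀::Q), …
def rowSpec (P : List Char) : List Char → List Char → List Nat
  | Q, [] => [lev P Q]
  | Q, d :: tz => lev P Q :: rowSpec P (d :: Q) tz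

lemma rowSpec_cons (P Q tz : List Char) :
    rowSpec P Q tz = lev P Q :: (rowSpec P Q tz).tail := by
  cases tz <;> rfl

lemma rowGoA_spec (c : Char) :
    ∀ (tz Q : List Char) (P : List Char) (a : Nat), a = lev (c :: P) Q →
      distRowA c a (rowSpec P Q tz) tz = (rowSpec (c :: P) Q tz).tail := by
  intro tz
  induction tz with
  | nil => intro Q P a _; simp [rowSpec, distRowA]
  | cons d tz' ih =>
    intro Q P a ha
    have hhd : rowSpec P (d :: Q) tz' = lev P (d :: Q) :: (rowSpec P (d :: Q) tz').tail :=
      rowSpec_cons P (d :: Q) tz'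
    have hcur : min (lev P (d :: Q) + 1) (min (a + 1) (lev P Q + (if c ≠ d then 1 else 0)))
        = lev (c :: P) (d :: Q) := by
      rw [lev_cons_cons, ha]
      have : (if c ≠ d then 1 else 0) = (if c = d then 0 else 1) := by
        by_cases h : c = d <;> simp [h]
      rw [this]
    show distRowA c a (lev P Q :: rowSpec P (d :: Q) tz') (d :: tz') = _
    rw [hhd]
    show (min (lev P (d :: Q) + 1) (min (a + 1) (lev P Q + (if c ≠ d then 1 else 0)))) ::
        distRowA c (min (lev P (d :: Q) + 1) (min (a + 1) (lev P Q + (if c ≠ d then 1 else 0))))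
          (lev P (d :: Q) :: (rowSpec P (d :: Q) tz').tail) tz' = _
    rw [hcur, ← hhd]
    rw [ih (d :: Q) P (lev (c :: P) (d :: Q)) rfl]
    show _ = ((lev (c :: P) Q :: rowSpec (c :: P) (d :: Q) tz') : List Nat).tail
    rw [rowSpec_cons (c :: P) (d :: Q) tz']
    simp

lemma distLoopA_spec (t : List Char) :
    ∀ (cs P : List Char) (i : Nat) (row : List Nat),
      i = P.length → row = rowSpec P [] t →
      distLoopA t cs i row = rowSpec (cs.reverse ++ P) [] t := by
  intro cs
  induction cs with
  | nil => intro P i row _ hrow; simp [distLoopA, hrow]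
  | cons c cs' ih =>
    intro P i row hi hrow
    show distLoopA t cs' (i + 1) ((i + 1) :: distRowA c (i + 1) row t) = _
    have hlev : i + 1 = lev (c :: P) [] := by rw [lev_nil_right]; simp [hi]
    have hnew : (i + 1) :: distRowA c (i + 1) row t = rowSpec (c :: P) [] t := by
      rw [hrow, rowGoA_spec c t [] P (i + 1) hlev, hlev, ← rowSpec_cons]
    rw [ih (c :: P) (i + 1) _ (by simp [hi]) hnew]
    simp

lemma rowSpec_last : ∀ (tz Q : List Char) (P : List Char),
    (rowSpec P Q tz).getLast?.getD 0 = lev P (tz.reverse ++ Q) := by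
  intro tz
  induction tz with
  | nil => intro Q P; simp [rowSpec]
  | cons d tz' ih =>
    intro Q P
    show ((lev P Q :: rowSpec P (d :: Q) tz').getLast?.getD 0 : Nat) = _
    rw [rowSpec_cons P (d :: Q) tz', List.getLast?_cons_cons, ← rowSpec_cons, ih]
    simp

lemma rowSpec_nil : ∀ (tz Q : List Char), rowSpec [] Q tz = List.range' Q.length (tz.length + 1) := by
  intro tz
  induction tz with
  | nil => intro Q; simp [rowSpec, lev_nil_left]
  | cons d tz' ih =>
    intro Q
    show lev [] Q :: rowSpec [] (d :: Q) tz' = _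
    rw [lev_nil_left, ih]
    simp [List.range'_succ]

lemma range_eq_rowSpec (t : List Char) : List.range (t.length + 1) = rowSpec [] [] t := by
  rw [rowSpec_nil]; simp [List.range_eq_range']

lemma distanceCoreA_eq (s1 s2 : List Char) (h : s1 ≠ []) : distanceCoreA s1 s2 = levd s1 s2 := by
  unfold distanceCoreA
  rw [if_neg h, distLoopA_spec s2 s1 [] 0 _ rfl (range_eq_rowSpec s2), rowSpec_last]
  simp [levd]

lemma distanceA_eq (s1 s2 : List Char) : distanceA s1 s2 = levd s1 s2 := by
  unfold distanceA
  by_cases h : s1.length < s2.length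
  · rw [if_pos h, distanceCoreA_eq s2 s1 (by intro he; simp [he] at h), edist_comm]
  · rw [if_neg h]
    by_cases h1 : s1 = []
    · have h2 : s2 = [] := by
        cases s2 with
        | nil => rfl
        | cons a l => exfalso; apply h; simp [h1]
      subst h1; subst h2
      simp [distanceCoreA, levd, lev_nil_left]
    · exact distanceCoreA_eq s1 s2 h1

lemma colRowB_eq_distRowA (c : Char) :
    ∀ (tz : List Char) (a : Nat) (prev : List Nat), colRowB c a tz prev = distRowA c a prev tz := by
  intro tz
  induction tz with
  | nil => intro a prev; cases prev with
    | nil => rfl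
    | cons p rest => cases rest <;> rfl
  | cons d tz' ih =>
    intro a prev
    match prev with
    | [] => rfl
    | [p] => rfl
    | p :: q :: rest =>
      show (min (a + 1) (min (q + 1) (p + (if d ≠ c then 1 else 0)))) :: _
          = (min (q + 1) (min (a + 1) (p + (if c ≠ d then 1 else 0)))) :: _
      have hc : (if d ≠ c then 1 else 0) = (if c ≠ d then 1 else 0) := by
        by_cases h : c = d <;> simp [h, Ne.symm]
      have hm : min (a + 1) (min (q + 1) (p + (if d ≠ c then 1 else 0)))
          = min (q + 1) (min (a + 1) (p + (if c ≠ d then 1 else 0))) := by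
        rw [hc]; omega
      rw [hm, ih]

-- the incremental column of B
def dpB (t fix : List Char) : List Nat := fix.foldl (colStepB t) (List.range (t.length + 1))

lemma colStepB_spec (t : List Char) (P : List Char) (c : Char) :
    colStepB t (rowSpec P [] t) c = rowSpec (c :: P) [] t := by
  rw [rowSpec_cons P [] t]
  show (lev P [] + 1) :: colRowB c (lev P [] + 1) t (lev P [] :: (rowSpec P [] t).tail) = _
  rw [← rowSpec_cons P [] t, colRowB_eq_distRowA,
    rowGoA_spec c t [] P (lev P [] + 1) (by simp [lev_nil_right]),
    rowSpec_cons (c :: P) [] t]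
  simp [lev_nil_right]

lemma dpB_fold (t : List Char) :
    ∀ (cs : List Char) (P : List Char),
      cs.foldl (colStepB t) (rowSpec P [] t) = rowSpec (cs.reverse ++ P) [] t := by
  intro cs
  induction cs with
  | nil => intro P; simp
  | cons c cs' ih =>
    intro P
    show cs'.foldl (colStepB t) (colStepB t (rowSpec P [] t) c) = _
    rw [colStepB_spec, ih (c :: P)]
    simp

lemma dpB_eq_rowSpec (t : List Char) (fix : List Char) : dpB t fix = rowSpec fix.reverse [] t := by
  unfold dpB
  rw [range_eq_rowSpec, dpB_fold t fix []]
  simp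

lemma dpB_last (t fix : List Char) : (dpB t fix).getLast?.getD 0 = levd fix t := by
  rw [dpB_eq_rowSpec, rowSpec_last]
  unfold levd
  simp

lemma dpB_append (t a b : List Char) : dpB t (a ++ b) = b.foldl (colStepB t) (dpB t a) := by
  unfold dpB; rw [List.foldl_append]

-- joining one more word onto the candidate substring
lemma join_take_succ (L : List (List Char)) :
    ∀ (k : Nat), k < L.length →
      PySem.Chars.join [' '] (L.take (k + 1)) =
        PySem.Chars.join [' '] (L.take k) ++ (if k = 0 then [] else [' ']) ++ L.getD k [] := by
  induction L with
  | nil => intro k hk; simp at hk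
  | cons w r ih =>
    intro k hk
    cases k with
    | zero =>
      simp [PySem.Chars.join_nil]
    | succ k' =>
      have hk' : k' < r.length := by simpa using hk
      have hr : r ≠ [] := by intro he; rw [he] at hk'; simp at hk'
      show PySem.Chars.join [' '] (w :: r.take (k' + 1)) = _
      have htk : ∀ m, m < r.length → ∃ x xs, r.take (m + 1) = x :: xs := by
        intro m hm
        cases hre : r.take (m + 1) with
        | nil =>
          exfalso
          rw [List.take_eq_nil_iff] at hre
          rcases hre with h | h
          · exact absurd h (by omega)
          · rw [h] at hm; simp at hm
        | cons x xs => exact ⟨x, xs, rfl⟩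
      obtain ⟨x, xs, hx⟩ := htk k' hk'
      rw [hx, PySem.Chars.join_cons_cons, ← hx, ih k' hk']
      cases k' with
      | zero =>
        simp [PySem.Chars.join_nil]
      | succ k'' =>
        obtain ⟨y, ys, hy⟩ := htk k'' (by omega)
        show _ = PySem.Chars.join [' '] (w :: r.take (k'' + 1)) ++ _ ++ _
        rw [hy, PySem.Chars.join_cons_cons, ← hy]
        simp

-- the candidate stream of B for one start (fix already contains k words)
def pcs (t : List Char) : List Char → Nat → List (List Char) → List (Int × List Char)
  | _, _, [] => []
  | fix, k, w :: ws =>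
      let fix' := fix ++ (if k = 0 then [] else [' ']) ++ w
      ((levd t fix' : Int) - ((k + 1 : Nat) : Int), fix') :: pcs t fix' (k + 1) ws

-- all candidates of one start, k = number of words joined (A's e - start)
def kCands (t : List Char) (l : List (List Char)) : List (Int × List Char) :=
  (List.range (l.length + 1)).map (fun k =>
    ((levd t (PySem.Chars.join [' '] (l.take k)) : Nat) - (k : Int),
      PySem.Chars.join [' '] (l.take k)))

lemma inner_fold_spec (t : List Char) :
    ∀ (ws : List (List Char)) (fix : List Char) (k : Nat) (b : Option (Int × List Char)),
      (ws.foldl (innerWordStep t) (dpB t fix, fix, k, b)).2.2.2 =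
        List.foldl updMinB b (pcs t fix k ws) := by
  intro ws
  induction ws with
  | nil => intro fix k b; simp [pcs]
  | cons w ws ih =>
    intro fix k b
    show (ws.foldl (innerWordStep t) (innerWordStep t (dpB t fix, fix, k, b) w)).2.2.2 = _
    have h1 : ((if k = 0 then ([] : List Char) else [' ']) ++ w).foldl (colStepB t) (dpB t fix)
        = dpB t (fix ++ (if k = 0 then [] else [' ']) ++ w) := by
      rw [List.append_assoc, dpB_append]
    have hstep : innerWordStep t (dpB t fix, fix, k, b) w =
        (dpB t (fix ++ (if k = 0 then [] else [' ']) ++ w),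
          fix ++ (if k = 0 then [] else [' ']) ++ w, k + 1,
          updMinB b (((levd t (fix ++ (if k = 0 then [] else [' ']) ++ w) : Nat) : Int)
              - ((k + 1 : Nat) : Int),
            fix ++ (if k = 0 then [] else [' ']) ++ w)) := by
      unfold innerWordStep
      dsimp only
      rw [h1, dpB_last, edist_comm]
    rw [hstep, ih]
    show _ = List.foldl updMinB b (pcs t fix k (w :: ws))
    simp only [pcs, List.foldl_cons]

lemma pcs_eq (t : List Char) :
    ∀ (l L : List (List Char)) (j : Nat), L.drop j = l →
      pcs t (PySem.Chars.join [' '] (L.take j)) j l =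
        (List.range l.length).map (fun i =>
          ((levd t (PySem.Chars.join [' '] (L.take (j + i + 1))) : Nat) - ((j + i + 1 : Nat) : Int),
            PySem.Chars.join [' '] (L.take (j + i + 1)))) := by
  intro l
  induction l with
  | nil => intro L j _; simp [pcs]
  | cons w ws ih =>
    intro L j h
    have hjlen : j < L.length := by
      have := congrArg List.length h
      simp at this
      omega
    have hw : L.getD j [] = w := by
      rw [List.getD_eq_getElem?_getD, ← List.head?_drop, h]
      rfl
    have hfix : PySem.Chars.join [' '] (L.take j) ++ (if j = 0 then [] else [' ']) ++ w
        = PySem.Chars.join [' '] (L.take (j + 1)) := by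
      rw [join_take_succ L j hjlen, hw]
    have hdrop : L.drop (j + 1) = ws := by
      have : L.drop (j + 1) = (L.drop j).drop 1 := by
        rw [List.drop_drop]
      rw [this, h]
      rfl
    show (((levd t (PySem.Chars.join [' '] (L.take j) ++ (if j = 0 then [] else [' ']) ++ w) : Nat) : Int)
        - ((j + 1 : Nat) : Int),
        PySem.Chars.join [' '] (L.take j) ++ (if j = 0 then [] else [' ']) ++ w)
        :: pcs t (PySem.Chars.join [' '] (L.take j) ++ (if j = 0 then [] else [' ']) ++ w) (j + 1) ws = _
    rw [hfix, ih L (j + 1) hdrop]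
    simp only [List.length_cons]
    rw [List.range_succ_eq_map, List.map_cons, List.map_map]
    congr 1
    · apply List.map_congr_left
      intro i _
      have harith : j + 1 + i + 1 = j + (i + 1) + 1 := by omega
      simp [Function.comp, Nat.succ_eq_add_one, harith]

lemma kCands_decomp (t : List Char) (L : List (List Char)) :
    kCands t L = ((t.length : Int) - (0 : Int), ([] : List Char)) :: pcs t [] 0 L := by
  unfold kCands
  rw [List.range_succ_eq_map, List.map_cons, List.map_map]
  have h0 : PySem.Chars.join [' '] (L.take 0) = [] := by
    simp [PySem.Chars.join_nil]
  have hpcs : pcs t [] 0 L = pcs t (PySem.Chars.join [' '] (L.take 0)) 0 L := by rw [h0]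
  rw [hpcs, pcs_eq t L L 0 (by simp)]
  congr 1
  · simp [levd, lev_nil_right]
  · apply List.map_congr_left
    intro i _
    simp [Function.comp, Nat.succ_eq_add_one]

lemma startStep_eq (t : List Char) (words : List (List Char)) (best : Option (Int × List Char))
    (start : Nat) :
    startStep t words best start = List.foldl updMinB best (kCands t (words.drop start)) := by
  unfold startStep
  dsimp only
  have hr : (List.range (t.length + 1)).getLast?.getD 0 = t.length := by
    rw [List.range_succ]
    simp
  have hsl : PySem.List.slice words (some (start : Int)) none = words.drop start := by
    rw [PySem.List.slice_from words (by positivity)]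
    simp
  have hdp : List.range (t.length + 1) = dpB t [] := rfl
  rw [hr, hsl, hdp, inner_fold_spec t (words.drop start) [] 0 _, kCands_decomp,
    List.foldl_cons]

lemma foldl_foldl_flatMap {α β γ : Type} (g : γ → β → γ) (f : α → List β) :
    ∀ (L : List α) (init : γ),
      L.foldl (fun acc x => (f x).foldl g acc) init = (L.flatMap f).foldl g init := by
  intro L
  induction L with
  | nil => intro init; simp
  | cons x xs ih => intro init; simp [List.foldl_append, ih]

lemma updMinB_fold_spec :
    ∀ (l : List (Int × List Char)) (b : Int × List Char),
      ∃ m, List.foldl updMinB (some b) l = some m ∧ m ∈ b :: l ∧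
        ∀ y ∈ b :: l, toLex m ≤ toLex y := by
  intro l
  induction l with
  | nil => intro b; exact ⟨b, rfl, by simp, by simp⟩
  | cons c l ih =>
    intro b
    show ∃ m, List.foldl updMinB (updMinB (some b) c) l = some m ∧ _ ∧ _
    by_cases h : toLex c < toLex b
    · obtain ⟨m, h1, h2, h3⟩ := ih c
      refine ⟨m, by simp [updMinB, h, h1], ?_, ?_⟩
      · rcases List.mem_cons.mp h2 with h2 | h2
        · simp [h2]
        · simp [List.mem_cons, h2]
      · intro y hy
        rcases List.mem_cons.mp hy with hy | hy
        · exact le_trans (h3 c (by simp)) (le_of_lt (hy ▸ h))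
        · exact h3 y hy
    · obtain ⟨m, h1, h2, h3⟩ := ih b
      refine ⟨m, by simp [updMinB, h, h1], ?_, ?_⟩
      · rcases List.mem_cons.mp h2 with h2 | h2
        · simp [h2]
        · simp [List.mem_cons, h2]
      · intro y hy
        rcases List.mem_cons.mp hy with hy | hy
        · exact h3 y (by simp [hy])
        · rcases List.mem_cons.mp hy with hy | hy
          · exact le_trans (h3 b (by simp)) (hy ▸ not_lt.mp h)
          · exact h3 y (by simp [hy])

lemma final_match (s t : List Char) (L : List (Int × List Char)) :
    (match PySem.List.sorted L (fun p => toLex p) false with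
      | [] => none
      | (_, fix) :: _ => some (String.ofList (pyReplaceOnce s fix t))) =
    (match List.foldl updMinB none L with
      | some (_, fix) => some (String.ofList (pyReplaceOnce s fix t))
      | none => none) := by
  cases L with
  | nil =>
    have hs0 : PySem.List.sorted ([] : List (Int × List Char)) (fun p => toLex p) false = [] :=
      (PySem.List.sorted_eq_nil_iff _ _ _).mpr rfl
    rw [hs0]
    rfl
  | cons c l =>
    have hfold : List.foldl updMinB none (c :: l) = List.foldl updMinB (some c) l := by
      simp [List.foldl_cons, updMinB]
    obtain ⟨m, hm1, hm2, hm3⟩ := updMinB_fold_spec l c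
    cases hs : PySem.List.sorted (c :: l) (fun p => toLex p) false with
    | nil => exact absurd ((PySem.List.sorted_eq_nil_iff _ _ _).mp hs) (by simp)
    | cons hd tl =>
      have hhd_mem : hd ∈ c :: l := (PySem.List.mem_sorted _ _ _ _).mp (hs ▸ List.mem_cons_self)
      have hle : ∀ y ∈ c :: l, toLex hd ≤ toLex y := PySem.List.key_head_sorted_le _ _ hs
      have heq : hd = m := toLex.injective (le_antisymm (hle m hm2) (hm3 hd hhd_mem))
      rw [hfold, hm1, ← heq]

lemma resA_eq (t : List Char) (words : List (List Char)) :
    ((List.range words.length).foldl (fun acc (start : Nat) =>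
      (List.range' start (words.length + 1 - start)).foldl (fun acc (e : Nat) =>
        acc ++ [(((distanceA t (PySem.Chars.join [' '] (PySem.List.slice words (some (start : Int)) (some (e : Int)))) : Nat) : Int) - ((e : Int) - (start : Int)),
          PySem.Chars.join [' '] (PySem.List.slice words (some (start : Int)) (some (e : Int))))]) acc) [])
    = (List.range words.length).flatMap (fun start => kCands t (words.drop start)) := by
  simp only [PySem.List.foldl_append_singleton_eq_map]
  rw [PySem.List.foldl_append_eq_flatMap, List.nil_append]
  apply List.flatMap_congr
  intro start hstart
  have hlt : start < words.length := List.mem_range.mp hstart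
  have hlen : words.length + 1 - start = (words.drop start).length + 1 := by
    rw [List.length_drop]; omega
  rw [hlen, List.range'_eq_map_range, List.map_map]
  unfold kCands
  apply List.map_congr_left
  intro k _
  have hsl : PySem.List.slice words (some (start : Int)) (some ((start + k : Nat) : Int))
      = (words.drop start).take k := by
    rw [PySem.List.slice_natCast words start (start + k)]
    congr 1
    omega
  simp only [Function.comp]
  rw [hsl, distanceA_eq]
  have harith : ((start + k : Nat) : Int) - (start : Int) = (k : Int) := by push_cast; ring
  rw [harith]

lemma bestB_eq (t : List Char) (words : List (List Char)) :
    (List.range words.length).foldl (startStep t words) none =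
      List.foldl updMinB none ((List.range words.length).flatMap (fun start => kCands t (words.drop start))) := by
  have h : (fun (best : Option (Int × List Char)) (start : Nat) => startStep t words best start)
      = fun best start => List.foldl updMinB best (kCands t (words.drop start)) := by
    funext best start; exact startStep_eq t words best start
  calc (List.range words.length).foldl (startStep t words) none
      = (List.range words.length).foldl (fun best start => List.foldl updMinB best (kCands t (words.drop start))) none := by rw [← h]
    _ = _ := foldl_foldl_flatMap _ _ _ _

theorem sentenceDist_eq_alt (sentence typo : String) :
    sentenceDist sentence typo = sentenceDist_alt sentence typo := by
  simp only [sentenceDist, sentenceDist_alt]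
  rw [resA_eq, bestB_eq]
  exact final_match _ _ _

-- ===== VERDICT (by name: the statement is the Claim_ definition above) =====
theorem sentenceDist_spec : Claim_equal_sentenceDist := by
  intro sentence typo _
  unfold Spec_sentenceDist
  exact sentenceDist_eq_alt sentence typo
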